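-- pv_equiv track=rewrite | github.com/BruceWW/python_design_pattern | t.py | canConvertString
-- ===== SOURCE A (Python) =====
-- def canConvertString(s: str, t: str, k: int) -> bool:
--     import collections
--     lack = []
--     for i in range(len(s)):
--         gap =  ord(t[i]) - ord(s[i])
--         if gap<0:
--             gap = 26+gap
--             lack.append(gap)
--         elif gap !=0:
--             lack.append(gap)
--
--     nums = collections.Counter(lack)
--     for key, value in nums.items():
--         if key != 0 and ((value - 1) * 26 + key) > k:
--             return False
--     return True
-- ===== SOURCE B (Python) =====
-- def _shift(a: str, b: str) -> int:
--     d = ord(b) - ord(a)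
--     return d + 26 if d < 0 else d
--
-- def canConvertString(s: str, t: str, k: int) -> bool:
--     # sort the nonzero shift amounts, then scan equal-value runs:
--     # the j-th occurrence (0-based) of shift g costs 26*j + g moves
--     gaps = sorted(g for g in (_shift(s[i], t[i]) for i in range(len(s))) if g)
--     prev = None
--     run = 0
--     for g in gaps:
--         run = run + 1 if g == prev else 1
--         if 26 * (run - 1) + g > k:
--             return False
--         prev = g
--     return True
-- ===== Notes on version B (the rewrite author's own statement) =====
-- stated objective: alternative
-- what changed: Replaced A's Counter-based counting (build list of gaps, hash-count, scan the counter items) by sort-then-run-scan: sort the nonzero shift gaps and walk equal-value runs with an early exit, checking 26*(run-1)+gap <= k at each step.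
import Mathlib
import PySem

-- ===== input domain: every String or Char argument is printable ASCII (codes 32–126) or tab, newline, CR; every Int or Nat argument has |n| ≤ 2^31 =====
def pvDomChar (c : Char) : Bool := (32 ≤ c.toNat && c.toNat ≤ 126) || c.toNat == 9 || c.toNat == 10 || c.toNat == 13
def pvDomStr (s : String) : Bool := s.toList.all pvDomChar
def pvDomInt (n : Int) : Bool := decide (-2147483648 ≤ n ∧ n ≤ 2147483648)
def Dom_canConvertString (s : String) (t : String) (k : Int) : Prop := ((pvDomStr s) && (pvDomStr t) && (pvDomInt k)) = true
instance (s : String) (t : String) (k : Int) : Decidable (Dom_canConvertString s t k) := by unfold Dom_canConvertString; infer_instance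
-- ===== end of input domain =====

-- B replaces A's Counter-based counting (build gap list, hash-count, scan the counter)
-- by sort-then-run-scan: sort the nonzero shift gaps and walk equal-value runs with an
-- early exit; same return value on Pre_ (alternative algorithm, no speed claim).

-- ===== PORT A =====
-- A: build 'lack' (normalized nonzero gaps), count with Counter, then scan the items.
-- pyGetD with default ' ' is exact under Pre_ (every index 0 ≤ i < len s is in range of both strings).
def canConvertString (s : String) (t : String) (k : Int) : Bool :=
  let sl := s.toList
  let tl := t.toList
  let lack : List Int :=
    (PySem.List.pyRange 0 (sl.length : Int) 1).foldl (fun acc i =>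
      let gap : Int := ((PySem.List.pyGetD tl i ' ').toNat : Int) - ((PySem.List.pyGetD sl i ' ').toNat : Int)
      if gap < 0 then acc ++ [26 + gap]
      else if gap ≠ 0 then acc ++ [gap]
      else acc) []
  let nums := PySem.Dict.counter lack
  !(nums.items.any (fun kv => kv.1 != 0 && decide ((kv.2 - 1) * 26 + kv.1 > k)))

-- ===== PORT B =====
-- B helper _shift: the normalized gap at index i (pyGetD exact under Pre_, as above).
def shiftF (sl tl : List Char) (i : Int) : Int :=
  let d : Int := ((PySem.List.pyGetD tl i ' ').toNat : Int) - ((PySem.List.pyGetD sl i ' ').toNat : Int)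
  if d < 0 then d + 26 else d

-- B's run scan over the sorted gap list: 'run' counts the current equal-value run.
def runGo (k : Int) (prev : Option Int) (run : Int) (l : List Int) : Bool :=
  match l with
  | [] => true
  | g :: r =>
      let run' : Int := if prev = some g then run + 1 else 1
      if 26 * (run' - 1) + g > k then false else runGo k (some g) run' r

def canConvertString_alt (s : String) (t : String) (k : Int) : Bool :=
  let sl := s.toList
  let tl := t.toList
  let gaps := PySem.List.sorted
      (((PySem.List.pyRange 0 (sl.length : Int) 1).map (shiftF sl tl)).filter (· ≠ 0))
      (fun x => x) false
  runGo k none 0 gaps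

-- ===== PRECONDITION & SPEC =====
-- Pre_ excludes len(t) < len(s), where Python A raises IndexError at t[i] (B raises there too).
def Pre_canConvertString (s : String) (t : String) (k : Int) : Prop :=
  s.toList.length ≤ t.toList.length
instance (s : String) (t : String) (k : Int) : Decidable (Pre_canConvertString s t k) := by
  unfold Pre_canConvertString; infer_instance

def pvWitness_canConvertString : String × String × Int := ("abcz", "bbdy", 51)

def Spec_canConvertString (s : String) (t : String) (k : Int) (out : Bool) : Prop := out = canConvertString_alt s t k
instance (s : String) (t : String) (k : Int) (out : Bool) : Decidable (Spec_canConvertString s t k out) := by unfold Spec_canConvertString; infer_instance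

-- ===== CLAIM (what is proved, stated in full; the proofs are below) =====
def Claim_equal_canConvertString : Prop := ∀ (s : String) (t : String) (k : Int), Dom_canConvertString s t k → Pre_canConvertString s t k → Spec_canConvertString s t k (canConvertString s t k)

-- ===== LEMMAS AND PROOFS =====

-- A's raw gap at index i
def gapA (sl tl : List Char) (i : Int) : Int :=
  ((PySem.List.pyGetD tl i ' ').toNat : Int) - ((PySem.List.pyGetD sl i ' ').toNat : Int)

-- nonzero normalized gaps of all indices (the multiset both programs judge)
def nzList (sl tl : List Char) : List Int :=
  ((PySem.List.pyRange 0 (sl.length : Int) 1).map (shiftF sl tl)).filter (· ≠ 0)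

-- prefix-wise condition characterizing a left-to-right scan (from index i0 on)
def Qcond (k : Int) (m : List Int) (i0 : Nat) : Prop :=
  ∀ j, i0 ≤ j → ∀ (h : j < m.length), 26 * ((m.take j).count m[j]) + m[j] ≤ k

-- count-wise condition characterizing A
def Pcond (k : Int) (l : List Int) : Prop :=
  ∀ x ∈ l, ((l.count x : Int) - 1) * 26 + x ≤ k

theorem Qcond_concat (k : Int) (l : List Int) (a : Int) :
    Qcond k (l ++ [a]) 0 ↔ Qcond k l 0 ∧ 26 * (l.count a : Int) + a ≤ k := by
  unfold Qcond
  constructor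
  · intro h
    refine ⟨?_, ?_⟩
    · intro j _ hj
      have hj' : j < (l ++ [a]).length := by simp; omega
      have := h j (Nat.zero_le _) hj'
      rwa [List.take_append_of_le_length (by omega), List.getElem_append_left hj] at this
    · have hl : l.length < (l ++ [a]).length := by simp
      have := h l.length (Nat.zero_le _) hl
      rw [List.take_append_of_le_length (le_refl _), List.take_length,
        List.getElem_concat_length rfl _] at this
      exact this
  · rintro ⟨h1, h2⟩ j _ hj
    have hj' : j < l.length + 1 := by simpa using hj
    rcases Nat.lt_or_ge j l.length with hlt | hge
    · rw [List.take_append_of_le_length (by omega), List.getElem_append_left hlt]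
      exact h1 j (Nat.zero_le _) hlt
    · have hj2 : j = l.length := by omega
      subst hj2
      rw [List.take_append_of_le_length (le_refl _), List.take_length,
        List.getElem_concat_length rfl _]
      exact h2

theorem Pcond_concat (k : Int) (l : List Int) (a : Int) :
    Pcond k (l ++ [a]) ↔ Pcond k l ∧ 26 * (l.count a : Int) + a ≤ k := by
  unfold Pcond
  constructor
  · intro h
    refine ⟨?_, ?_⟩
    · intro x hx
      have hx' := h x (by simp [hx])
      have hc : (l ++ [a]).count x = l.count x + if a = x then 1 else 0 := by
        simp [List.count_append, List.count_singleton]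
      rw [hc] at hx'
      by_cases hax : a = x
      · subst hax
        simp at hx'
        omega
      · simpa [hax] using hx'
    · have hx' := h a (by simp)
      have hc : (l ++ [a]).count a = l.count a + 1 := by
        simp [List.count_append]
      rw [hc] at hx'
      push_cast at hx' ⊢
      omega
  · rintro ⟨h1, h2⟩ x hx
    have hc : (l ++ [a]).count x = l.count x + if a = x then 1 else 0 := by
      simp [List.count_append, List.count_singleton]
    rw [hc]
    rcases List.mem_append.1 hx with hx | hx
    · have := h1 x hx
      by_cases hax : a = x
      · subst hax
        push_cast at this h2 ⊢
        omega
      · simpa [hax] using this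
    · have hx2 : x = a := by simpa using hx
      subst hx2
      push_cast at h2 ⊢
      omega

theorem Q_iff_P (k : Int) (l : List Int) : Qcond k l 0 ↔ Pcond k l := by
  induction l using List.reverseRecOn with
  | nil =>
    constructor
    · intro _ x hx; cases hx
    · intro _ j _ hj; simp at hj
  | append_singleton l a ih =>
    rw [Qcond_concat, Pcond_concat, ih]

theorem Pcond_perm (k : Int) (l l' : List Int) (hp : l.Perm l') : Pcond k l ↔ Pcond k l' := by
  unfold Pcond
  constructor
  · intro h x hx
    rw [← hp.count_eq]
    exact h x (hp.mem_iff.2 hx)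
  · intro h x hx
    rw [hp.count_eq]
    exact h x (hp.mem_iff.1 hx)

-- B's run scan on a sorted list checks exactly the prefix-wise condition
theorem runGo_iff (k : Int) : ∀ (l p : List Int) (prev : Option Int) (run : Int),
    (p ++ l).Pairwise (· ≤ ·) →
    (∀ g ∈ l, (p.count g : Int) = if prev = some g then run else 0) →
    (runGo k prev run l = true ↔ Qcond k (p ++ l) p.length) := by
  intro l
  induction l with
  | nil =>
    intro p prev run _ _
    simp only [runGo, List.append_nil, true_iff]
    intro j hj hjl
    omega
  | cons g r ih =>
    intro p prev run hpw hcnt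
    have hrun' : (if prev = some g then run + 1 else 1) = (p.count g : Int) + 1 := by
      have := hcnt g (by simp)
      rcases eq_or_ne prev (some g) with h | h
      · rw [if_pos h] at this ⊢; omega
      · rw [if_neg h] at this ⊢; omega
    have hat : (p ++ g :: r)[p.length]'(by simp) = g := by
      rw [List.getElem_append_right (le_refl _)]
      simp
    have htake : (p ++ g :: r).take p.length = p := by
      rw [List.take_append_of_le_length (le_refl _), List.take_length]
    -- every element of p is ≤ every element of g :: r, and g ≤ every element of r
    have hsplit := (List.pairwise_append.1 hpw)
    have hle : ∀ x ∈ p, ∀ y ∈ g :: r, x ≤ y := hsplit.2.2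
    have hgr : ∀ y ∈ r, g ≤ y := by
      have := hsplit.2.1
      exact (List.pairwise_cons.1 this).1
    simp only [runGo, hrun']
    by_cases hgt : 26 * ((p.count g : Int) + 1 - 1) + g > k
    · simp only [hgt, if_pos]
      constructor
      · intro hfalse; cases hfalse
      · intro hq
        have := hq p.length (le_refl _) (by simp)
        rw [htake, hat] at this
        omega
    · simp only [hgt, if_neg, not_false_eq_true]
      have hpw' : ((p ++ [g]) ++ r).Pairwise (· ≤ ·) := by
        rw [List.append_assoc]; simpa using hpw
      have hcnt' : ∀ g' ∈ r, ((p ++ [g]).count g' : Int) = if (some g : Option Int) = some g' then (p.count g : Int) + 1 else 0 := by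
        intro g' hg'
        by_cases hgg : g = g'
        · subst hgg
          simp only [List.count_append]
          push_cast
          simp
        · have hnot : g' ∉ p := by
            intro hmem
            have h1 : g' ≤ g := hle g' hmem g (by simp)
            have h2 : g ≤ g' := hgr g' hg'
            exact hgg (le_antisymm h2 h1)
          simp [List.count_append, List.count_eq_zero.2 hnot, hgg]
      have := ih (p ++ [g]) (some g) ((p.count g : Int) + 1) hpw' hcnt'
      rw [List.append_assoc] at this
      simp only [List.singleton_append] at this
      rw [this]
      simp only [List.length_append, List.length_singleton]
      unfold Qcond
      constructor
      · intro hq j hj hjl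
        rcases Nat.lt_or_ge j (p.length + 1) with hlt | hge
        · have hj2 : j = p.length := by omega
          subst hj2
          rw [htake, hat]
          omega
        · exact hq j hge hjl
      · intro hq j hj hjl
        exact hq j (by omega) hjl

theorem shiftF_eq (sl tl : List Char) (i : Int) :
    shiftF sl tl i = if gapA sl tl i < 0 then gapA sl tl i + 26 else gapA sl tl i := rfl

-- A's lack list, filtered of zeros, is nzList
theorem lack_filter (sl tl : List Char) (L : List Int) :
    ((L.flatMap (fun i =>
        if gapA sl tl i < 0 then [26 + gapA sl tl i]
        else if gapA sl tl i ≠ 0 then [gapA sl tl i]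
        else [])).filter (· ≠ 0))
      = (L.map (shiftF sl tl)).filter (· ≠ 0) := by
  induction L with
  | nil => rfl
  | cons i L ih =>
    simp only [List.flatMap_cons, List.map_cons, List.filter_append, List.filter_cons, ih,
      shiftF_eq]
    by_cases h0 : gapA sl tl i < 0
    · have : (26 : Int) + gapA sl tl i = gapA sl tl i + 26 := by ring
      simp only [h0, if_pos, List.filter_cons, this]
      split_ifs <;> simp
    · by_cases h1 : gapA sl tl i = 0
      · simp [h1]
      · simp [h0, h1]

theorem count_mem_filter_ne (l : List Int) (x : Int) (hx : x ≠ 0) :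
    (l.filter (· ≠ 0)).count x = l.count x := by
  simp [List.count_filter, hx]

theorem A_iff (s t : String) (k : Int) :
    canConvertString s t k = true ↔ Pcond k (nzList s.toList t.toList) := by
  have hfun : (fun (acc : List Int) (i : Int) =>
      let gap : Int := ((PySem.List.pyGetD t.toList i ' ').toNat : Int) - ((PySem.List.pyGetD s.toList i ' ').toNat : Int)
      if gap < 0 then acc ++ [26 + gap]
      else if gap ≠ 0 then acc ++ [gap]
      else acc)
      = (fun (acc : List Int) (i : Int) => acc ++
          (if gapA s.toList t.toList i < 0 then [26 + gapA s.toList t.toList i]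
           else if gapA s.toList t.toList i ≠ 0 then [gapA s.toList t.toList i]
           else [])) := by
    funext acc i
    simp only [gapA]
    split_ifs <;> simp
  simp only [canConvertString]
  rw [hfun, PySem.List.foldl_append_eq_flatMap]
  rw [List.nil_append, PySem.Dict.items_counter, List.any_map]
  set lack := (PySem.List.pyRange 0 (s.toList.length : Int) 1).flatMap
      (fun i => if gapA s.toList t.toList i < 0 then [26 + gapA s.toList t.toList i]
                else if gapA s.toList t.toList i ≠ 0 then [gapA s.toList t.toList i]
                else []) with hlack
  have hnz : nzList s.toList t.toList = lack.filter (· ≠ 0) := by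
    unfold nzList
    rw [hlack, lack_filter]
  rw [hnz]
  rw [Bool.not_eq_eq_eq_not, Bool.not_true, List.any_eq_false]
  unfold Pcond
  constructor
  · intro h x hx
    rw [List.mem_filter] at hx
    obtain ⟨hxl, hx0'⟩ := hx
    have hx0 : x ≠ 0 := by simpa using hx0'
    have hxm : x ∈ PySem.Set.ofList lack := by
      rw [PySem.Set.mem_ofList]; exact hxl
    have hcond := h _ hxm
    rw [count_mem_filter_ne lack x hx0]
    simp only [Function.comp_apply, Bool.and_eq_true, bne_iff_ne, decide_eq_true_eq, not_and, not_lt] at hcond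
    exact hcond hx0
  · intro h x hx
    rw [PySem.Set.mem_ofList] at hx
    simp only [Function.comp_apply, Bool.and_eq_true, bne_iff_ne, decide_eq_true_eq, not_and, not_lt]
    intro hx0
    have hxf : x ∈ lack.filter (· ≠ 0) := by
      rw [List.mem_filter]; exact ⟨hx, by simpa using hx0⟩
    have := h x hxf
    rw [count_mem_filter_ne lack x hx0] at this
    exact this

theorem B_iff (s t : String) (k : Int) :
    canConvertString_alt s t k = true ↔
      Qcond k (PySem.List.sorted (nzList s.toList t.toList) (fun x => x) false) 0 := by
  unfold canConvertString_alt
  have hpw : (([] : List Int) ++ PySem.List.sorted (nzList s.toList t.toList) (fun x => x) false).Pairwise (· ≤ ·) := by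
    simpa using PySem.List.sorted_pairwise (nzList s.toList t.toList) (fun x => x)
  have := runGo_iff k (PySem.List.sorted (nzList s.toList t.toList) (fun x => x) false) [] none 0
    hpw (by intro g _; simp)
  simpa [nzList] using this

-- ===== VERDICT (by name: the statement is the Claim_ definition above) =====
theorem canConvertString_spec : Claim_equal_canConvertString := by
  intro s t k _ _
  unfold Spec_canConvertString
  have hA := A_iff s t k
  have hB := B_iff s t k
  have hQP := Q_iff_P k (PySem.List.sorted (nzList s.toList t.toList) (fun x => x) false)
  have hperm := Pcond_perm k (PySem.List.sorted (nzList s.toList t.toList) (fun x => x) false)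
    (nzList s.toList t.toList) (PySem.List.sorted_perm _ _ _)
  cases hcA : canConvertString s t k <;> cases hcB : canConvertString_alt s t k <;> simp_all
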